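-- pv_equiv track=rewrite | github.com/Parcly-Taxel/Shibuya | shibuya/generators.py | delete_vertices
-- ===== SOURCE A (Python) =====
-- def delete_vertices(graph, dverts):
--     """Delete the vertices indexed by dverts from graph; return the resulting graph."""
--     vertices, edges = graph
--     remverts = list(filter(lambda x: x not in dverts, range(len(vertices))))
--     vmap = {v: n for (n, v) in enumerate(remverts)}
--     nvertices = list(map(vertices.__getitem__, remverts))
--     nedges = []
--     for (a, b) in edges:
--         if a in dverts or b in dverts:
--             continue
--         nedges.append((vmap[a], vmap[b]))
--     return (nvertices, tuple(nedges))
-- ===== SOURCE B (Python) =====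
-- def delete_vertices(graph, dverts):
--     """Delete the vertices indexed by dverts from graph; return the resulting graph."""
--     vertices, edges = graph
--     n = len(vertices)
--     dels = sorted({d for d in dverts if 0 <= d < n})
--     nvertices = []
--     prev = 0
--     for d in dels:
--         nvertices.extend(vertices[prev:d])
--         prev = d + 1
--     nvertices.extend(vertices[prev:])
--     dset = set(dverts)
--     def newidx(a):
--         lo, hi = 0, len(dels)
--         while lo < hi:
--             mid = (lo + hi) // 2
--             if dels[mid] < a:
--                 lo = mid + 1
--             else:
--                 hi = mid
--         return a - lo
--     nedges = tuple((newidx(a), newidx(b)) for (a, b) in edges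
--                    if a not in dset and b not in dset)
--     return (nvertices, nedges)
-- ===== Notes on version B (the rewrite author's own statement) =====
-- stated objective: faster
-- what changed: Instead of A's kept-index dict (built from a filtered range), B sorts the deduplicated in-range deleted indices once, copies the kept vertices slice-by-slice between deleted positions, and renumbers each kept edge endpoint as the index minus a binary-searched count of deleted indices below it (with O(1) set membership for the skip test).
import Mathlib
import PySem

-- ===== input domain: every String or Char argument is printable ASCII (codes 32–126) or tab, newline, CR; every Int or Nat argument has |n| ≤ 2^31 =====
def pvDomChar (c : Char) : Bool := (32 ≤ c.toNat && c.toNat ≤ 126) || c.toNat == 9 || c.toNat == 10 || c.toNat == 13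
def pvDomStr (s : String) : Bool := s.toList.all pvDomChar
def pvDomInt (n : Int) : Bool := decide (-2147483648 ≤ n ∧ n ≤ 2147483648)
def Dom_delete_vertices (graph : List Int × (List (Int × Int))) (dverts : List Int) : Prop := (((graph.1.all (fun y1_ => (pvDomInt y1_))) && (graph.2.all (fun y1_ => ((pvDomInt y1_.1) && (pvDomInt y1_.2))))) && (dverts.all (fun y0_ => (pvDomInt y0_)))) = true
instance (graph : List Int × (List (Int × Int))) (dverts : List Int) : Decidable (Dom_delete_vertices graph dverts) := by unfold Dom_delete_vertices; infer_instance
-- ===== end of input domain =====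

-- B replaces A's kept-index dict with a sorted deduplicated list of in-range deleted
-- indices: vertices are copied slice-by-slice between deleted positions and each kept
-- endpoint is renumbered by binary search over that list (alternative algorithm).

-- ===== PORT A =====
def delete_vertices (graph : List Int × (List (Int × Int))) (dverts : List Int) : List Int × (List (Int × Int)) :=
  let vertices := graph.1
  let edges := graph.2
  let remverts := (PySem.List.pyRange 0 (vertices.length : Int) 1).filter (fun x => !(dverts.contains x))
  let vmap : PySem.Dict Int Int :=
    (PySem.List.enumerate remverts 0).foldl (fun d nv => d.insert nv.2 nv.1) PySem.Dict.empty
  -- remverts elements come from range(len(vertices)), so vertices[v] never raises: getD is exact here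
  let nvertices := remverts.map (fun v => PySem.List.pyGetD vertices v 0)
  -- vmap[a]/vmap[b] raise KeyError exactly outside Pre_; under Pre_ the keys exist, so getD is exact
  let nedges := edges.foldl (fun acc e =>
    if dverts.contains e.1 || dverts.contains e.2 then acc
    else acc ++ [(vmap.getD e.1 0, vmap.getD e.2 0)]) []
  (nvertices, nedges)

-- ===== PORT B =====
-- the hand-written while-loop binary search of Source B (lo, hi as in the Python);
-- the Nat fuel only makes the loop structurally terminating: hi - lo shrinks each pass,
-- so fuel = initial hi - lo (supplied at the call site) never runs out
def pvBsearch (dels : List Int) (a : Int) : Nat → Int → Int → Int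
  | 0, lo, _ => lo
  | fuel + 1, lo, hi =>
    if lo < hi then
      let mid := PySem.Int.floordiv (lo + hi) 2
      -- Source B only calls this with 0 ≤ lo < hi ≤ len(dels), so dels[mid] never raises: getD is exact
      if PySem.List.pyGetD dels mid 0 < a then pvBsearch dels a fuel (mid + 1) hi
      else pvBsearch dels a fuel lo mid
    else lo

def delete_vertices_alt (graph : List Int × (List (Int × Int))) (dverts : List Int) : List Int × (List (Int × Int)) :=
  let vertices := graph.1
  let edges := graph.2
  let n : Int := (vertices.length : Int)
  let dels := PySem.List.sorted (PySem.Set.ofList (dverts.filter (fun d => decide (0 ≤ d) && decide (d < n)))) (fun x => x) false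
  let pr := dels.foldl (fun s d => (s.1 ++ PySem.List.slice vertices (some s.2) (some d), d + 1)) (([] : List Int), (0 : Int))
  let nvertices := pr.1 ++ PySem.List.slice vertices (some pr.2) none
  let dset := PySem.Set.ofList dverts
  let newidx := fun (a : Int) => a - pvBsearch dels a dels.length 0 (dels.length : Int)
  let nedges := (edges.filter (fun e => !(dset.contains e.1) && !(dset.contains e.2))).map (fun e => (newidx e.1, newidx e.2))
  (nvertices, nedges)

-- ===== PRECONDITION & SPEC =====
-- Pre_ excludes exactly the inputs on which A raises KeyError: an edge whose endpoints are both
-- kept (neither is in dverts) but one of them is not a valid index into vertices (not a key of vmap).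
def Pre_delete_vertices (graph : List Int × (List (Int × Int))) (dverts : List Int) : Prop :=
  ∀ e ∈ graph.2, (e.1 ∉ dverts ∧ e.2 ∉ dverts) →
    (0 ≤ e.1 ∧ e.1 < graph.1.length ∧ 0 ≤ e.2 ∧ e.2 < graph.1.length)
instance (graph : List Int × (List (Int × Int))) (dverts : List Int) : Decidable (Pre_delete_vertices graph dverts) := by unfold Pre_delete_vertices; infer_instance

def pvWitness_delete_vertices : (List Int × (List (Int × Int))) × List Int :=
  (([5, 6, 7], [(0, 2), (1, 0)]), [1])

def Spec_delete_vertices (graph : List Int × (List (Int × Int))) (dverts : List Int) (out : List Int × (List (Int × Int))) : Prop := out = delete_vertices_alt graph dverts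
instance (graph : List Int × (List (Int × Int))) (dverts : List Int) (out : List Int × (List (Int × Int))) : Decidable (Spec_delete_vertices graph dverts out) := by unfold Spec_delete_vertices; infer_instance

-- ===== CLAIM (what is proved, stated in full; the proofs are below) =====
def Claim_equal_delete_vertices : Prop := ∀ (graph : List Int × (List (Int × Int))) (dverts : List Int), Dom_delete_vertices graph dverts → Pre_delete_vertices graph dverts → Spec_delete_vertices graph dverts (delete_vertices graph dverts)

-- ===== LEMMAS AND PROOFS =====

-- number of deleted (resp. kept) indices below a
def pvCntIn (d : List Int) (a : Int) : Int :=
  (((PySem.List.pyRange 0 a 1).filter (fun x => decide (x ∈ d))).length : Int)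
def pvCntNot (d : List Int) (a : Int) : Int :=
  (((PySem.List.pyRange 0 a 1).filter (fun x => !decide (x ∈ d))).length : Int)

lemma pvCnt_add (d : List Int) (a : Int) (ha : 0 ≤ a) : pvCntNot d a + pvCntIn d a = a := by
  unfold pvCntIn pvCntNot
  have h := List.length_eq_length_filter_add (l := PySem.List.pyRange 0 a 1)
      (fun x => decide (x ∈ d))
  beta_reduce at h
  have hlen : (PySem.List.pyRange 0 a 1).length = a.toNat := by
    simp [PySem.List.length_pyRange_one]
  omega

-- A's vmap fold: value at every kept in-range key is the number of kept indices below it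
lemma pv_vmap_inv (d : List Int) (n : Nat) :
    ∀ a : Int, 0 ≤ a → a < n → a ∉ d →
      ((PySem.List.enumerate ((PySem.List.pyRange 0 (n : Int) 1).filter (fun x => !decide (x ∈ d))) 0).foldl
        (fun dd nv => dd.insert nv.2 nv.1) PySem.Dict.empty).getD a 0 = pvCntNot d a := by
  induction n with
  | zero => intro a h0 h1; omega
  | succ n ih =>
    intro a h0 h1 hc
    have hsplit : PySem.List.pyRange 0 ((n + 1 : Nat) : Int) 1
        = PySem.List.pyRange 0 (n : Int) 1 ++ [(n : Int)] := by
      push_cast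
      exact PySem.List.pyRange_one_succ_right (by positivity)
    rw [hsplit, List.filter_append]
    by_cases hn : (n : Int) ∈ d
    · have han : a < (n : Int) := by
        push_cast at h1
        rcases lt_or_eq_of_le (by omega : a ≤ (n : Int)) with h | h
        · exact h
        · exact absurd (h ▸ hn) hc
      rw [show List.filter (fun x => !decide (x ∈ d)) [(n : Int)] = [] by simp [hn]]
      rw [List.append_nil]
      exact ih a h0 han hc
    · rw [show List.filter (fun x => !decide (x ∈ d)) [(n : Int)] = [(n : Int)] by simp [hn]]
      rw [PySem.List.enumerate_append, List.foldl_append]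
      simp only [PySem.List.enumerate, List.foldl_cons, List.foldl_nil]
      by_cases hna : a = (n : Int)
      · subst hna
        rw [PySem.Dict.getD_insert_self]
        unfold pvCntNot
        simp
      · have han : a < (n : Int) := by push_cast at h1; omega
        rw [PySem.Dict.getD_insert_of_ne _ _ _ hna]
        exact ih a h0 han hc

-- B's dels: sorted(set(in-range deleted)) IS the in-range indices filtered for membership in dverts
lemma pv_dels_char (dverts : List Int) (n : Int) :
    PySem.List.sorted (PySem.Set.ofList (dverts.filter (fun d => decide (0 ≤ d) && decide (d < n)))) (fun x => x) false
    = (PySem.List.pyRange 0 n 1).filter (fun x => dverts.contains x) := by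
  apply PySem.List.sorted_eq_of_perm_of_pairwise_lt
  · rw [List.perm_ext_iff_of_nodup]
    · intro x
      simp [PySem.Set.mem_ofList, PySem.List.mem_pyRange_one, List.mem_filter]
      tauto
    · exact (PySem.List.nodup_pyRange_one 0 n).filter _
    · exact PySem.Set.nodup_ofList _
  · exact (PySem.List.pairwise_lt_pyRange_one 0 n).filter _

-- a slice with in-range bounds is the corresponding index range mapped through indexing
lemma pv_slice_map (xs : List Int) (a b : Int) (h0 : 0 ≤ a) (hab : a ≤ b) (hb : b ≤ xs.length) :
    PySem.List.slice xs (some a) (some b)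
    = (PySem.List.pyRange a b 1).map (fun v => PySem.List.pyGetD xs v 0) := by
  rw [PySem.List.slice_toNat xs h0 (by omega)]
  apply List.ext_getElem
  · simp [PySem.List.length_pyRange_one]
    omega
  · intro i h1 h2
    simp only [List.getElem_take, List.getElem_drop, List.getElem_map]
    rw [PySem.List.getElem_pyRange_one]
    have hi : i < (b - a).toNat := by simpa [PySem.List.length_pyRange_one] using h2
    rw [PySem.List.pyGetD_eq_getElem xs 0 (by omega) (by omega)]
    congr 1
    omega

-- B's slice-collecting loop produces the kept vertices of A
lemma pv_slices (vertices D : List Int) :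
    ∀ (ds : List Int) (acc : List Int) (p : Int), 0 ≤ p →
      ds.Pairwise (· < ·) →
      (∀ x ∈ ds, p ≤ x ∧ x < (vertices.length : Int)) →
      (∀ x : Int, p ≤ x → x < (vertices.length : Int) → (x ∈ D ↔ x ∈ ds)) →
      (ds.foldl (fun s d => (s.1 ++ PySem.List.slice vertices (some s.2) (some d), d + 1)) (acc, p)).1
        ++ PySem.List.slice vertices
            (some (ds.foldl (fun s d => (s.1 ++ PySem.List.slice vertices (some s.2) (some d), d + 1)) (acc, p)).2) none
      = acc ++ ((PySem.List.pyRange p (vertices.length : Int) 1).filter (fun x => !(D.contains x))).map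
          (fun v => PySem.List.pyGetD vertices v 0) := by
  intro ds
  induction ds with
  | nil =>
    intro acc p hp _ _ hmem
    simp only [List.foldl_nil]
    have hfilt : (PySem.List.pyRange p (vertices.length : Int) 1).filter (fun x => !(D.contains x))
        = PySem.List.pyRange p (vertices.length : Int) 1 := by
      apply List.filter_eq_self.mpr
      intro x hx
      rw [PySem.List.mem_pyRange_one] at hx
      simp [(hmem x hx.1 hx.2)]
    rw [hfilt, PySem.List.slice_from vertices hp, PySem.List.map_pyGetD_pyRange' vertices 0 hp]
  | cons d ds ih =>
    intro acc p hp hpw hrange hmem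
    have hd := hrange d (by simp)
    have hdD : d ∈ D := (hmem d hd.1 hd.2).mpr (by simp)
    have hgt : ∀ x ∈ ds, d < x := by
      intro x hx; exact (List.pairwise_cons.mp hpw).1 x hx
    simp only [List.foldl_cons]
    rw [ih (acc ++ PySem.List.slice vertices (some p) (some d)) (d + 1) (by omega)
        (List.pairwise_cons.mp hpw).2
        (fun x hx => ⟨by have := hgt x hx; omega, (hrange x (by simp [hx])).2⟩)
        (fun x hx1 hx2 => by
          rw [hmem x (by omega) hx2]
          simp only [List.mem_cons]
          constructor
          · rintro (h | h)
            · omega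
            · exact h
          · intro h; exact Or.inr h)]
    rw [PySem.List.pyRange_one_append p d (vertices.length : Int) hd.1 (by omega),
        PySem.List.pyRange_one_cons hd.2, List.filter_append, List.filter_cons]
    have hkeep : (PySem.List.pyRange p d 1).filter (fun x => !(D.contains x))
        = PySem.List.pyRange p d 1 := by
      apply List.filter_eq_self.mpr
      intro x hx
      rw [PySem.List.mem_pyRange_one] at hx
      have : x ∉ D := by
        rw [hmem x hx.1 (by omega)]
        simp only [List.mem_cons]
        rintro (h | h)
        · omega
        · have := hgt x h; omega
      simp [this]
    rw [hkeep]
    simp only [List.contains_eq_mem, hdD, decide_true, Bool.not_true, Bool.false_eq_true,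
      if_false, List.map_append]
    rw [pv_slice_map vertices p d hp (by omega) (by exact_mod_cast hd.2.le)]
    simp [List.append_assoc]

-- threshold property of a strictly increasing list: elements below a occupy exactly the first countP positions
lemma pv_thresh (l : List Int) (hl : l.Pairwise (· < ·)) (a : Int) :
    ∀ i (h : i < l.length), (l[i] < a ↔ i < l.countP (fun x => decide (x < a))) := by
  induction l with
  | nil => intro i h; exact absurd h (by simp)
  | cons x t ih =>
    have hx := (List.pairwise_cons.mp hl).1
    have ht := (List.pairwise_cons.mp hl).2
    intro i h
    rcases i with _ | j
    · simp only [List.getElem_cons_zero, List.countP_cons]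
      by_cases hxa : x < a
      · simp [hxa]
      · have h0 : t.countP (fun x => decide (x < a)) = 0 := by
          rw [List.countP_eq_zero]
          intro y hy
          simp only [decide_eq_true_eq]
          have := hx y hy
          omega
        simp [hxa, h0]
    · have hj : j < t.length := by simpa using h
      have hih := ih ht j hj
      simp only [List.getElem_cons_succ, List.countP_cons]
      by_cases hxa : x < a
      · simp only [hxa, decide_true, if_true]
        constructor
        · intro hta; have := hih.mp hta; omega
        · intro hcnt; exact hih.mpr (by omega)
      · have hja : ¬ t[j] < a := by
          have := hx t[j] (List.getElem_mem hj)
          omega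
        have h0 : t.countP (fun x => decide (x < a)) = 0 := by
          rw [List.countP_eq_zero]
          intro y hy
          simp only [decide_eq_true_eq]
          have := hx y hy
          omega
        simp [hxa, hja, h0]

-- the binary search returns the threshold position (any sufficient fuel)
lemma pv_bs (l : List Int) (a : Int) (k : Nat)
    (hk : ∀ i (h : i < l.length), (l[i] < a ↔ i < k)) :
    ∀ (m : Nat) (lo hi : Int), (hi - lo).toNat ≤ m → 0 ≤ lo → hi ≤ (l.length : Int) →
      lo ≤ (k : Int) → (k : Int) ≤ hi → pvBsearch l a m lo hi = k := by
  intro m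
  induction m with
  | zero =>
    intro lo hi hm h0 hhi hlok hkhi
    simp only [pvBsearch]
    omega
  | succ m ihm =>
    intro lo hi hm h0 hhi hlok hkhi
    by_cases h : lo < hi
    · have hstep : pvBsearch l a (m + 1) lo hi
          = if PySem.List.pyGetD l (PySem.Int.floordiv (lo + hi) 2) 0 < a then
              pvBsearch l a m (PySem.Int.floordiv (lo + hi) 2 + 1) hi
            else pvBsearch l a m lo (PySem.Int.floordiv (lo + hi) 2) := by
        rw [pvBsearch, if_pos h]
      rw [hstep]
      have hmid1 : lo ≤ PySem.Int.floordiv (lo + hi) 2 :=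
        (PySem.Int.le_floordiv_iff_mul_le (by omega)).mpr (by omega)
      have hmid2 : PySem.Int.floordiv (lo + hi) 2 < hi :=
        (PySem.Int.floordiv_lt_iff_lt_mul (by omega)).mpr (by omega)
      set mid := PySem.Int.floordiv (lo + hi) 2 with hmd
      have hmidn : mid.toNat < l.length := by omega
      rw [PySem.List.pyGetD_eq_getElem l 0 (by omega) (by omega)]
      by_cases hlt : l[mid.toNat] < a
      · have hmk : mid.toNat < k := (hk mid.toNat hmidn).mp hlt
        rw [if_pos hlt]
        exact ihm (mid + 1) hi (by omega) (by omega) hhi (by omega) hkhi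
      · have hmk : ¬ mid.toNat < k := fun hc => hlt ((hk mid.toNat hmidn).mpr hc)
        rw [if_neg hlt]
        exact ihm lo mid (by omega) h0 (by omega) hlok (by omega)
    · rw [pvBsearch, if_neg h]
      omega

-- number of dels elements below a kept endpoint a equals the number of deleted indices below a
lemma pv_count_lt (D : List Int) (n a : Int) (h0 : 0 ≤ a) (han : a ≤ n) :
    (((PySem.List.pyRange 0 n 1).filter (fun x => D.contains x)).countP (fun x => decide (x < a)) : Int)
    = pvCntIn D a := by
  rw [List.countP_filter,
      PySem.List.pyRange_one_append 0 a n h0 han, List.countP_append]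
  have h2 : (PySem.List.pyRange a n 1).countP (fun x => decide (x < a) && D.contains x) = 0 := by
    rw [List.countP_eq_zero]
    intro x hx
    rw [PySem.List.mem_pyRange_one] at hx
    simp only [Bool.and_eq_true, decide_eq_true_eq]
    rintro ⟨h, -⟩
    omega
  have h1 : (PySem.List.pyRange 0 a 1).countP (fun x => decide (x < a) && D.contains x)
      = (PySem.List.pyRange 0 a 1).countP (fun x => decide (x ∈ D)) := by
    apply List.countP_congr
    intro x hx
    rw [PySem.List.mem_pyRange_one] at hx
    simp [hx.2, List.contains_eq_mem]
  rw [h1, h2]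
  unfold pvCntIn
  rw [← List.countP_eq_length_filter]
  simp

-- the renumbering agreement: A's dict value = B's binary-searched subtraction, for kept in-range endpoints
lemma pv_key (D : List Int) (n : Nat) (a : Int) (h0 : 0 ≤ a) (h1 : a < n) (hc : a ∉ D) :
    ((PySem.List.enumerate ((PySem.List.pyRange 0 (n : Int) 1).filter (fun x => !decide (x ∈ D))) 0).foldl
        (fun dd nv => dd.insert nv.2 nv.1) PySem.Dict.empty).getD a 0
    = a - pvBsearch ((PySem.List.pyRange 0 (n : Int) 1).filter (fun x => D.contains x)) a
        ((PySem.List.pyRange 0 (n : Int) 1).filter (fun x => D.contains x)).length 0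
        ((((PySem.List.pyRange 0 (n : Int) 1).filter (fun x => D.contains x)).length : Nat) : Int) := by
  set l := (PySem.List.pyRange 0 (n : Int) 1).filter (fun x => D.contains x) with hl
  have hpw : l.Pairwise (· < ·) := (PySem.List.pairwise_lt_pyRange_one 0 (n : Int)).filter _
  set k := l.countP (fun x => decide (x < a)) with hkdef
  have hkl : k ≤ l.length := List.countP_le_length
  have hbs : pvBsearch l a l.length 0 (l.length : Int) = k :=
    pv_bs l a k (pv_thresh l hpw a) l.length 0
      (l.length : Int) (by omega) (by omega) (by omega) (by omega) (by omega)
  rw [hbs, pv_vmap_inv D n a h0 h1 hc]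
  have hcnt : (k : Int) = pvCntIn D a := pv_count_lt D (n : Int) a h0 (by exact_mod_cast h1.le)
  have hadd := pvCnt_add D a h0
  omega

-- ===== VERDICT (by name: the statement is the Claim_ definition above) =====
theorem delete_vertices_spec : Claim_equal_delete_vertices := by
  intro graph dverts _hdom hpre
  obtain ⟨vertices, edges⟩ := graph
  unfold Spec_delete_vertices delete_vertices delete_vertices_alt
  simp only
  rw [pv_dels_char dverts (vertices.length : Int)]
  refine Prod.ext ?_ ?_
  · -- vertices
    simp only
    rw [pv_slices vertices dverts _ [] 0 le_rfl
        ((PySem.List.pairwise_lt_pyRange_one 0 (vertices.length : Int)).filter _)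
        (fun x hx => by
          rw [List.mem_filter, PySem.List.mem_pyRange_one] at hx
          exact ⟨hx.1.1, hx.1.2⟩)
        (fun x hx1 hx2 => by
          rw [List.mem_filter, PySem.List.mem_pyRange_one]
          simp [List.contains_eq_mem]
          omega)]
    rw [List.nil_append]
  · -- edges
    simp only
    rw [show (fun (acc : List (Int × Int)) (e : Int × Int) =>
          if dverts.contains e.1 || dverts.contains e.2 then acc
          else acc ++ [(((PySem.List.enumerate ((PySem.List.pyRange 0 (vertices.length : Int) 1).filter
              (fun x => !(dverts.contains x))) 0).foldl
              (fun d nv => d.insert nv.2 nv.1) PySem.Dict.empty).getD e.1 0,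
            ((PySem.List.enumerate ((PySem.List.pyRange 0 (vertices.length : Int) 1).filter
              (fun x => !(dverts.contains x))) 0).foldl
              (fun d nv => d.insert nv.2 nv.1) PySem.Dict.empty).getD e.2 0)]) =
        (fun acc e =>
          if !(dverts.contains e.1 || dverts.contains e.2) then acc ++ [(((PySem.List.enumerate ((PySem.List.pyRange 0 (vertices.length : Int) 1).filter
              (fun x => !(dverts.contains x))) 0).foldl
              (fun d nv => d.insert nv.2 nv.1) PySem.Dict.empty).getD e.1 0,
            ((PySem.List.enumerate ((PySem.List.pyRange 0 (vertices.length : Int) 1).filter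
              (fun x => !(dverts.contains x))) 0).foldl
              (fun d nv => d.insert nv.2 nv.1) PySem.Dict.empty).getD e.2 0)] else acc)
      from funext fun acc => funext fun e => by cases h : (dverts.contains e.1 || dverts.contains e.2) <;> simp_all]
    rw [PySem.List.foldl_append_if]
    rw [List.nil_append]
    have hfilt : edges.filter (fun e => !(dverts.contains e.1 || dverts.contains e.2))
        = edges.filter (fun e => !(PySem.Set.contains (PySem.Set.ofList dverts) e.1)
            && !(PySem.Set.contains (PySem.Set.ofList dverts) e.2)) := by
      apply List.filter_congr
      intro e _
      simp [PySem.Set.mem_ofList, List.contains_eq_mem]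
    rw [hfilt]
    apply List.map_congr_left
    intro e he
    rw [List.mem_filter] at he
    have hkept : e.1 ∉ dverts ∧ e.2 ∉ dverts := by
      have := he.2
      simp [PySem.Set.mem_ofList] at this
      exact this
    obtain ⟨h1a, h1b, h2a, h2b⟩ := hpre e he.1 hkept
    have k1 := pv_key dverts vertices.length e.1 h1a (by exact_mod_cast h1b) hkept.1
    have k2 := pv_key dverts vertices.length e.2 h2a (by exact_mod_cast h2b) hkept.2
    simp only [List.contains_eq_mem] at k1 k2 ⊢
    rw [k1, k2]
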